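-- pv_equiv track=rewrite | github.com/davigole/Algoritmo-de-Euclides | src/code/Análise/Iterações.py | SolucaoIngenua
-- ===== SOURCE A (Python) =====
-- def SolucaoIngenua(a, b):
--     if (a == 0 or b == 0): return 0
--
--     a = abs(a)
--     b = abs(b)
--
--     iters = 0
--
--     for i in range(min(a, b), 0, -1):
--         iters += 1
--
--         if ((a % i) == 0 and (b % i) == 0):
--             return iters
-- ===== SOURCE B (Python) =====
-- def SolucaoIngenua(a, b):
--     if a == 0 or b == 0:
--         return 0
--     a = abs(a)
--     b = abs(b)
--     m = min(a, b)
--     x, y = a, b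
--     while y:
--         x, y = y, x % y
--     return m - x + 1
-- ===== Notes on version B (the rewrite author's own statement) =====
-- stated objective: faster
-- what changed: Replaced the linear downward scan for the greatest common divisor with the Euclidean algorithm and the closed form min(|a|,|b|) - gcd + 1.
import Mathlib
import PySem

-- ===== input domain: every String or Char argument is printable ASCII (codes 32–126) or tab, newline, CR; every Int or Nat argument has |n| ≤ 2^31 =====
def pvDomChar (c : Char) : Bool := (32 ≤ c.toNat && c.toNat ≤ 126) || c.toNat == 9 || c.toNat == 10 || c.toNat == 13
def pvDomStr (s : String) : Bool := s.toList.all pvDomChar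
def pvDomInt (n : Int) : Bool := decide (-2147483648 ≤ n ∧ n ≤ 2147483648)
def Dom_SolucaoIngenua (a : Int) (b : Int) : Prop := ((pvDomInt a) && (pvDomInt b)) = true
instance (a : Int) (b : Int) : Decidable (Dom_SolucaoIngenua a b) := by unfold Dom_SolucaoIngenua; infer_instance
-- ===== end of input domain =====

-- B replaces A's linear downward scan for the first common divisor by the Euclidean
-- algorithm and the closed form min(|a|,|b|) - gcd + 1 (faster).

-- ===== PORT A =====
-- the 'for i in range(min(a,b), 0, -1)' loop, i counting down; iters accumulates;
-- the 0 at exhaustion is unreachable (for a,b ≠ 0 the loop always returns at i = 1,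
-- where Python would otherwise fall off and return None).
def pvLoopA (a b : Int) : Nat → Int → Int
  | 0, _ => 0
  | i + 1, iters =>
      if PySem.Int.mod a ((i : Int) + 1) = 0 ∧ PySem.Int.mod b ((i : Int) + 1) = 0 then
        iters + 1
      else
        pvLoopA a b i (iters + 1)

def SolucaoIngenua (a : Int) (b : Int) : Int :=
  if a = 0 ∨ b = 0 then 0
  else
    let a' := |a|
    let b' := |b|
    pvLoopA a' b' (min a' b').toNat 0

-- ===== PORT B =====
-- 'while y: x, y = y, x % y'
def pvGcdB (x y : Int) : Int :=
  if _h : y = 0 then x else pvGcdB y (PySem.Int.mod x y)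
termination_by y.natAbs
decreasing_by
  rcases lt_trichotomy y 0 with hy | hy | hy
  · have := PySem.Int.mod_neg_bounds x (b := y) hy; omega
  · exact absurd hy (by simpa using _h)
  · have h1 := PySem.Int.mod_nonneg x (b := y) hy
    have h2 := PySem.Int.mod_lt x (b := y) hy
    omega

def SolucaoIngenua_alt (a : Int) (b : Int) : Int :=
  if a = 0 ∨ b = 0 then 0
  else
    let a' := |a|
    let b' := |b|
    let m := min a' b'
    m - pvGcdB a' b' + 1

-- ===== PRECONDITION & SPEC =====
def Spec_SolucaoIngenua (a : Int) (b : Int) (out : Int) : Prop := out = SolucaoIngenua_alt a b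
instance (a : Int) (b : Int) (out : Int) : Decidable (Spec_SolucaoIngenua a b out) := by unfold Spec_SolucaoIngenua; infer_instance

-- ===== CLAIM (what is proved, stated in full; the proofs are below) =====
def Claim_equal_SolucaoIngenua : Prop := ∀ (a : Int) (b : Int), Dom_SolucaoIngenua a b → Spec_SolucaoIngenua a b (SolucaoIngenua a b)

-- ===== LEMMAS AND PROOFS =====

-- Euclid computes Int.gcd on nonnegative inputs
theorem gcd_step (x y : Int) (hx : 0 ≤ x) (hy : 0 < y) :
    Int.gcd y (x % y) = Int.gcd x y := by
  have hm : x % y = ((x.natAbs % y.natAbs : Nat) : Int) := by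
    push_cast ; rw [abs_of_nonneg hx, abs_of_nonneg (le_of_lt hy)]
  rw [Int.gcd, Int.gcd, hm]
  simp only [Int.natAbs_natCast]
  rw [Nat.gcd_comm x.natAbs y.natAbs, Nat.gcd_rec y.natAbs x.natAbs, Nat.gcd_comm]

theorem pvGcdB_eq_gcd_aux (n : Nat) : ∀ (x y : Int), 0 ≤ x → 0 ≤ y → y.toNat ≤ n →
    pvGcdB x y = Int.gcd x y := by
  induction n with
  | zero =>
      intro x y hx hy hn
      have hy0 : y = 0 := by omega
      subst hy0
      rw [pvGcdB]
      simp [Int.gcd, Int.natAbs_of_nonneg hx]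
  | succ n ih =>
      intro x y hx hy hn
      rw [pvGcdB]
      split_ifs with h
      · subst h ; simp [Int.gcd, Int.natAbs_of_nonneg hx]
      · have hy' : 0 < y := lt_of_le_of_ne hy (Ne.symm h)
        rw [PySem.Int.mod_eq_emod_of_pos (a := x) hy']
        have hmn : 0 ≤ x % y := Int.emod_nonneg x (by omega)
        have hml : x % y < y := Int.emod_lt_of_pos x hy'
        rw [ih y (x % y) hy hmn (by omega)]
        exact_mod_cast gcd_step x y hx hy'

theorem pvGcdB_eq_gcd (x y : Int) (hx : 0 ≤ x) (hy : 0 ≤ y) :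
    pvGcdB x y = Int.gcd x y :=
  pvGcdB_eq_gcd_aux y.toNat x y hx hy (le_refl _)

-- the countdown loop: for 1 ≤ g ≤ i, g the gcd, the loop returns iters + (i - g) + 1
theorem pvLoopA_eq (a b : Int) (ha : 0 < a) (hb : 0 < b) (i : Nat) (iters : Int)
    (hgi : Int.gcd a b ≤ i) :
    pvLoopA a b i iters = iters + ((i : Int) - Int.gcd a b) + 1 := by
  induction i generalizing iters with
  | zero =>
      exfalso
      have : 0 < Int.gcd a b := Int.gcd_pos_of_ne_zero_left b (by omega)
      omega
  | succ i ih =>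
      rw [pvLoopA]
      by_cases hdvd : ((i : Int) + 1) ∣ a ∧ ((i : Int) + 1) ∣ b
      · -- i+1 divides both, hence i+1 ≤ gcd, hence i+1 = gcd
        have hdg : ((i : Int) + 1) ∣ (Int.gcd a b : Int) := by exact_mod_cast Int.dvd_gcd hdvd.1 hdvd.2
        have hgpos : 0 < Int.gcd a b := Int.gcd_pos_of_ne_zero_left b (by omega)
        have hle : (i : Int) + 1 ≤ (Int.gcd a b : Int) :=
          Int.le_of_dvd (by exact_mod_cast hgpos) hdg
        have heq : ((Int.gcd a b : Int)) = (i : Int) + 1 := by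
          push_cast at hgi ⊢; omega
        rw [if_pos]
        · rw [heq]; push_cast; ring
        · exact ⟨(PySem.Int.mod_eq_zero_iff_dvd a _).mpr hdvd.1,
                 (PySem.Int.mod_eq_zero_iff_dvd b _).mpr hdvd.2⟩
      · have hcond : ¬ (PySem.Int.mod a ((i : Int) + 1) = 0 ∧ PySem.Int.mod b ((i : Int) + 1) = 0) := by
          intro ⟨h1, h2⟩
          exact hdvd ⟨(PySem.Int.mod_eq_zero_iff_dvd a _).mp h1,
                      (PySem.Int.mod_eq_zero_iff_dvd b _).mp h2⟩
        rw [if_neg hcond]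
        have hgi' : Int.gcd a b ≤ i := by
          by_contra hlt
          have heq : Int.gcd a b = i + 1 := by omega
          have h1 : ((i : Int) + 1) ∣ a := by
            have := Int.gcd_dvd_left a b
            rw [heq] at this; exact_mod_cast this
          have h2 : ((i : Int) + 1) ∣ b := by
            have := Int.gcd_dvd_right a b
            rw [heq] at this; exact_mod_cast this
          exact hdvd ⟨h1, h2⟩
        rw [ih (iters + 1) hgi']
        push_cast; ring

-- ===== VERDICT (by name: the statement is the Claim_ definition above) =====
theorem SolucaoIngenua_spec : Claim_equal_SolucaoIngenua := by
  intro a b _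
  unfold Spec_SolucaoIngenua SolucaoIngenua SolucaoIngenua_alt
  by_cases h0 : a = 0 ∨ b = 0
  · simp [h0]
  · push_neg at h0
    rw [if_neg (by tauto), if_neg (by tauto)]
    show pvLoopA |a| |b| (min |a| |b|).toNat 0 = min |a| |b| - pvGcdB |a| |b| + 1
    have ha : 0 < |a| := abs_pos.mpr h0.1
    have hb : 0 < |b| := abs_pos.mpr h0.2
    have hg : Int.gcd |a| |b| ≤ (min |a| |b|).toNat := by
      have h1 : (Int.gcd |a| |b| : Int) ∣ |a| := Int.gcd_dvd_left |a| |b|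
      have h2 : (Int.gcd |a| |b| : Int) ∣ |b| := Int.gcd_dvd_right |a| |b|
      have l1 : (Int.gcd |a| |b| : Int) ≤ |a| := Int.le_of_dvd ha h1
      have l2 : (Int.gcd |a| |b| : Int) ≤ |b| := Int.le_of_dvd hb h2
      omega
    rw [pvLoopA_eq |a| |b| ha hb (min |a| |b|).toNat 0 hg]
    rw [pvGcdB_eq_gcd |a| |b| (abs_nonneg a) (abs_nonneg b)]
    have hgab : Int.gcd |a| |b| = Int.gcd a b := by
      simp [Int.gcd, Int.natAbs_abs]
    rw [hgab]
    have hmin : ((min |a| |b|).toNat : Int) = min |a| |b| := by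
      have : 0 ≤ min |a| |b| := le_min (abs_nonneg a) (abs_nonneg b)
      omega
    rw [hmin]
    ring
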